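-- pv_equiv track=rewrite | github.com/dmi-try/etudes | python/2048.py | merge_field
-- ===== SOURCE A (Python) =====
-- def merge_field(field):
-- 	new_field = []
-- 	while field:
-- 		n = field[0]
-- 		field.remove(n)
-- 		if n in field:
-- 			field.remove(n)
-- 			new_field.append(n*2)
-- 		else:
-- 			new_field.append(n)
-- 	return new_field
-- ===== SOURCE B (Python) =====
-- def merge_field(field):
--     # One pass with occurrence counters (A scans and removes from the list, O(n^2));
--     # unlike A, does not mutate `field`.
--     cnt = {}
--     for x in field:
--         cnt[x] = cnt.get(x, 0) + 1
--     new_field = []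
--     seen = {}
--     for x in field:
--         k = seen.get(x, 0) + 1
--         seen[x] = k
--         if k % 2 == 1:
--             new_field.append(x * 2 if k < cnt[x] else x)
--     return new_field
-- ===== Notes on version B (the rewrite author's own statement) =====
-- stated objective: faster
-- what changed: A repeatedly scans and removes matching elements from the list (list.remove / 'in' inside a while loop, quadratic); B makes one counting pass to get totals and one pass with a seen-counter, emitting each odd occurrence (doubled when a partner remains) with no list mutation or rescans.
import Mathlib
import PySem

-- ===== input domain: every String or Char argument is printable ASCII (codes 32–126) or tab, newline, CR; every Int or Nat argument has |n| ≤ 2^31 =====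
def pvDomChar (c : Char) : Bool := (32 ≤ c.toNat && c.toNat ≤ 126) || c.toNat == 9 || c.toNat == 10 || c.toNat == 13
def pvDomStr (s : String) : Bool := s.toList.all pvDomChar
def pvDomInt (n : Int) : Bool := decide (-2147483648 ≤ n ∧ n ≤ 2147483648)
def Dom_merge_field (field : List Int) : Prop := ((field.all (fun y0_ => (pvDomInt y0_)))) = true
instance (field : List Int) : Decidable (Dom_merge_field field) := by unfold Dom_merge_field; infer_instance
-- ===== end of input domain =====

-- B replaces A's quadratic scan-and-remove loop by a single counting pass; equivalence is about
-- the RETURN value only (the Python A empties its argument list in place, B does not mutate it).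

-- ===== PORT A =====
-- A's while loop: n = field[0]; field.remove(n) removes the head itself; a later
-- `field.remove(n)` with `n in field` is exactly `List.erase` (first matching element).
def merge_field_loop (field new_field : List Int) : List Int :=
  match field with
  | [] => new_field
  | n :: rest =>
      if n ∈ rest then merge_field_loop (rest.erase n) (new_field ++ [n * 2])
      else merge_field_loop rest (new_field ++ [n])
termination_by field.length
decreasing_by
  · have h : (rest.erase n).length ≤ rest.length := List.length_erase_le
    simp; omega
  · simp

def merge_field (field : List Int) : List Int := merge_field_loop field []

-- ===== PORT B =====
-- cnt = {}; for x in field: cnt[x] = cnt.get(x, 0) + 1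
def merge_field_cnt (field : List Int) : PySem.Dict Int Int :=
  field.foldl (fun d x => d.insert x (d.getD x 0 + 1)) PySem.Dict.empty

def merge_field_alt (field : List Int) : List Int :=
  let cnt := merge_field_cnt field
  (field.foldl
    (fun (s : PySem.Dict Int Int × List Int) x =>
      let k := s.1.getD x 0 + 1
      let seen := s.1.insert x k
      if PySem.Int.mod k 2 = 1 then
        (seen, s.2 ++ [if k < cnt.getD x 0 then x * 2 else x])
      else (seen, s.2))
    (PySem.Dict.empty, [])).2

-- ===== PRECONDITION & SPEC =====
def Spec_merge_field (field : List Int) (out : List Int) : Prop := out = merge_field_alt field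
instance (field : List Int) (out : List Int) : Decidable (Spec_merge_field field out) := by unfold Spec_merge_field; infer_instance

-- ===== CLAIM (what is proved, stated in full; the proofs are below) =====
def Claim_equal_merge_field : Prop := ∀ (field : List Int), Dom_merge_field field → Spec_merge_field field (merge_field field)

-- ===== LEMMAS AND PROOFS =====

-- Abstract form of B's second loop: τ = total counts, σ = seen-so-far counts (as functions).
def hB (τ : Int → Int) : List Int → (Int → Int) → List Int
  | [], _ => []
  | x :: t, σ =>
      (if PySem.Int.mod (σ x + 1) 2 = 1 then
        [if σ x + 1 < τ x then x * 2 else x] else [])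
      ++ hB τ t (fun y => if y = x then σ x + 1 else σ y)

-- The pure spec A's loop computes (cons form of the accumulator loop).
def coreA (field : List Int) : List Int :=
  match field with
  | [] => []
  | n :: rest =>
      if n ∈ rest then n * 2 :: coreA (rest.erase n)
      else n :: coreA rest
termination_by field.length
decreasing_by
  · have h : (rest.erase n).length ≤ rest.length := List.length_erase_le
    simp; omega
  · simp

theorem merge_field_loop_eq (field acc : List Int) :
    merge_field_loop field acc = acc ++ coreA field := by
  induction field using coreA.induct generalizing acc with
  | case1 => simp [merge_field_loop, coreA]
  | case2 n rest h ih =>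
      rw [merge_field_loop, coreA]; simp only [h, if_pos]
      rw [ih]; simp
  | case3 n rest h ih =>
      rw [merge_field_loop, coreA]; simp only [h, if_false]
      rw [ih]; simp

-- Parity/offset invariance: if σ and τ are both shifted by the same even amount on every
-- element of t, the emitted list is unchanged.
theorem hB_shift (t : List Int) (τ τ' σ σ' : Int → Int) (c : Int → Int)
    (h : ∀ x ∈ t, σ x = σ' x + 2 * c x ∧ τ x = τ' x + 2 * c x) :
    hB τ t σ = hB τ' t σ' := by
  induction t generalizing σ σ' with
  | nil => rfl
  | cons x t ih =>
      obtain ⟨hσ, hτ⟩ := h x (by simp)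
      have emod : ∀ a : Int, PySem.Int.mod a 2 = a % 2 := fun a =>
        PySem.Int.mod_eq_emod_of_pos (by norm_num)
      have hpar : PySem.Int.mod (σ x + 1) 2 = PySem.Int.mod (σ' x + 1) 2 := by
        rw [emod, emod]; omega
      have hlt : (σ x + 1 < τ x) ↔ (σ' x + 1 < τ' x) := by omega
      rw [hB, hB]
      simp only [hpar, hlt]
      congr 1
      apply ih
      intro y hy
      by_cases hyx : y = x
      · subst hyx
        exact ⟨by omega, (h y (by simp)).2⟩
      · simpa [hyx] using h y (by simp [hy])

theorem hB_append (τ : Int → Int) (a b : List Int) (σ : Int → Int) :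
    hB τ (a ++ b) σ = hB τ a σ ++ hB τ b (fun y => σ y + (a.count y : Int)) := by
  induction a generalizing σ with
  | nil => simp [hB]
  | cons x t ih =>
      simp only [List.cons_append, hB]
      rw [ih, List.append_assoc]
      congr 2
      apply hB_shift _ _ _ _ _ (fun _ => 0)
      intro y hy
      refine ⟨?_, by ring⟩
      by_cases hyx : y = x
      · subst hyx; simp; omega
      · simp [hyx, Ne.symm hyx]

-- The tail of A's merging step: after the leading n is merged with the first later n
-- (rest = l₁ ++ n :: l₂), the remaining pass over l₁ ++ n :: l₂ with seen{n}=1 skips that n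
-- and behaves like a fresh pass over l₁ ++ l₂.
theorem hB_tail (n : Int) (l₁ l₂ : List Int) (hn₁ : n ∉ l₁) :
    hB (fun x => (((l₁ ++ l₂).count x : Nat) : Int)) (l₁ ++ l₂) (fun _ => 0)
    = hB (fun x => (((n :: (l₁ ++ n :: l₂)).count x : Nat) : Int)) (l₁ ++ n :: l₂)
        (fun y => if y = n then (0:Int) + 1 else 0) := by
  have hcnt1 : l₁.count n = 0 := List.count_eq_zero_of_not_mem hn₁
  rw [hB_append, hB_append, hB]
  have hmid : ¬ (PySem.Int.mod ((if n = n then (0:Int) + 1 else 0) + (l₁.count n : Int) + 1) 2 = 1) := by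
    have emod : ∀ a : Int, PySem.Int.mod a 2 = a % 2 := fun a =>
      PySem.Int.mod_eq_emod_of_pos (by norm_num)
    simp [hcnt1]
  rw [if_neg hmid, List.nil_append]
  congr 1
  · apply hB_shift _ _ _ _ _ (fun _ => 0)
    intro y hy
    have hyn : y ≠ n := fun h => hn₁ (h ▸ hy)
    refine ⟨by simp [hyn], ?_⟩
    simp [List.count_append, Ne.symm hyn]
  · apply hB_shift _ _ _ _ _ (fun y => if y = n then -1 else 0)
    intro y hy
    by_cases hyn : y = n
    · subst hyn
      refine ⟨by simp [hcnt1], ?_⟩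
      simp [List.count_append, hcnt1]
      ring
    · refine ⟨by simp [hyn], ?_⟩
      simp [hyn, List.count_append, Ne.symm hyn]

-- A's recursion computes exactly B's counting pass.
theorem coreA_eq (field : List Int) :
    coreA field = hB (fun x => (field.count x : Int)) field (fun _ => 0) := by
  induction field using coreA.induct with
  | case1 => rw [coreA]; rfl
  | case2 n rest hmem ih =>
      rw [coreA, if_pos hmem, hB]
      have hc : (0:Int) + 1 < ((n :: rest).count n : Int) := by
        have h1 : 1 ≤ rest.count n := List.one_le_count_iff.mpr hmem
        simp [List.count_cons_self]; omega
      rw [if_pos (show PySem.Int.mod ((0:Int)+1) 2 = 1 by decide), if_pos hc, ih]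
      rw [List.singleton_append]
      congr 1
      obtain ⟨l₁, l₂, hn₁, hrest, herase⟩ := List.exists_erase_eq hmem
      rw [herase, hrest]
      exact hB_tail n l₁ l₂ hn₁
  | case3 n rest hmem ih =>
      rw [coreA, if_neg hmem, hB]
      have hc : ¬ ((0:Int) + 1 < ((n :: rest).count n : Int)) := by
        have h0 : rest.count n = 0 := List.count_eq_zero_of_not_mem hmem
        simp [List.count_cons_self, h0]
      rw [if_pos (show PySem.Int.mod ((0:Int)+1) 2 = 1 by decide), if_neg hc, ih]
      rw [List.singleton_append]
      congr 1
      apply hB_shift _ _ _ _ _ (fun _ => 0)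
      intro y hy
      have hyn : y ≠ n := fun h => hmem (h ▸ hy)
      refine ⟨by simp [hyn], ?_⟩
      simp [Ne.symm hyn]

-- B's fold equals hB starting from any seen-dictionary (step function written let-free).
theorem fold_eq_hB (cnt : PySem.Dict Int Int) (l : List Int) (seen : PySem.Dict Int Int)
    (acc : List Int) :
    (l.foldl
      (fun (s : PySem.Dict Int Int × List Int) x =>
        if PySem.Int.mod (s.1.getD x 0 + 1) 2 = 1 then
          (s.1.insert x (s.1.getD x 0 + 1), s.2 ++ [if s.1.getD x 0 + 1 < cnt.getD x 0 then x * 2 else x])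
        else (s.1.insert x (s.1.getD x 0 + 1), s.2))
      (seen, acc)).2
    = acc ++ hB (fun x => cnt.getD x 0) l (fun y => seen.getD y 0) := by
  induction l generalizing seen acc with
  | nil => simp [hB]
  | cons x t ih =>
      rw [List.foldl_cons]
      have hupd : (fun y => (seen.insert x (seen.getD x 0 + 1)).getD y 0)
           = (fun y => if y = x then seen.getD x 0 + 1 else seen.getD y 0) := by
        funext y; rw [PySem.Dict.getD_insert]
      by_cases h : PySem.Int.mod (seen.getD x 0 + 1) 2 = 1
      · rw [show (if PySem.Int.mod ((seen, acc).1.getD x 0 + 1) 2 = 1 then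
              ((seen, acc).1.insert x ((seen, acc).1.getD x 0 + 1),
                (seen, acc).2 ++ [if (seen, acc).1.getD x 0 + 1 < cnt.getD x 0 then x * 2 else x])
            else ((seen, acc).1.insert x ((seen, acc).1.getD x 0 + 1), (seen, acc).2))
            = (seen.insert x (seen.getD x 0 + 1), acc ++ [if seen.getD x 0 + 1 < cnt.getD x 0 then x * 2 else x])
            from by rw [if_pos h]]
        rw [ih, hupd, hB, if_pos h]
        simp
      · rw [show (if PySem.Int.mod ((seen, acc).1.getD x 0 + 1) 2 = 1 then
              ((seen, acc).1.insert x ((seen, acc).1.getD x 0 + 1),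
                (seen, acc).2 ++ [if (seen, acc).1.getD x 0 + 1 < cnt.getD x 0 then x * 2 else x])
            else ((seen, acc).1.insert x ((seen, acc).1.getD x 0 + 1), (seen, acc).2))
            = (seen.insert x (seen.getD x 0 + 1), acc)
            from by rw [if_neg h]]
        rw [ih, hupd, hB, if_neg h]
        simp

theorem merge_field_alt_eq (field : List Int) :
    merge_field_alt field = hB (fun x => (field.count x : Int)) field (fun _ => 0) := by
  unfold merge_field_alt
  dsimp only
  rw [fold_eq_hB]
  have hcnt : ∀ x, (merge_field_cnt field).getD x 0 = (field.count x : Int) := by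
    intro x
    unfold merge_field_cnt
    rw [PySem.Dict.foldl_insert_getD_add_one_eq_counter, PySem.Dict.getD_counter]
  simp only [hcnt, PySem.Dict.getD_empty, List.nil_append]

-- ===== VERDICT (by name: the statement is the Claim_ definition above) =====
theorem merge_field_spec : Claim_equal_merge_field := by
  intro field _
  unfold Spec_merge_field
  rw [merge_field_alt_eq, merge_field, merge_field_loop_eq, List.nil_append, coreA_eq]
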